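-- pv_equiv track=rewrite | github.com/qrtt1/jenkins-inspector | jenkins_tools/credential_describers/ssh_key_credentials.py | parse_secret_output
-- ===== SOURCE A (Python) =====
-- from typing import Optional, Dict, Any
--
-- def parse_secret_output(output: str) -> Dict[str, Any]:
--     lines = output.strip().split("\n")
--     secret_data = {}
--
--     i = 0
--     while i < len(lines):
--         line = lines[i]
--         if line.startswith("USERNAME:"):
--             secret_data["username"] = line.split(":", 1)[1]
--         elif line == "PRIVATE_KEY_START":
--             key_lines = []
--             i += 1
--             while i < len(lines) and lines[i] != "PRIVATE_KEY_END":
--                 key_lines.append(lines[i])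
--                 i += 1
--             secret_data["private_key"] = "\n".join(key_lines)
--         i += 1
--
--     return secret_data
-- ===== SOURCE B (Python) =====
-- def parse_secret_output(output: str):
--     secret_data = {}
--     in_key = False
--     key_lines = []
--     for line in output.strip().split("\n"):
--         if in_key:
--             if line == "PRIVATE_KEY_END":
--                 secret_data["private_key"] = "\n".join(key_lines)
--                 in_key = False
--             else:
--                 key_lines.append(line)
--         elif line.startswith("USERNAME:"):
--             secret_data["username"] = line.split(":", 1)[1]
--         elif line == "PRIVATE_KEY_START":
--             in_key = True
--             key_lines = []
--     if in_key:
--         secret_data["private_key"] = "\n".join(key_lines)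
--     return secret_data
-- ===== Notes on version B (the rewrite author's own statement) =====
-- stated objective: simpler
-- what changed: Replaced the manual-index while-loop with a nested consuming inner loop by a single flat for-loop state machine over the lines (an in_key flag and a key_lines buffer, with an after-loop commit for an unterminated key block).
import Mathlib
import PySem

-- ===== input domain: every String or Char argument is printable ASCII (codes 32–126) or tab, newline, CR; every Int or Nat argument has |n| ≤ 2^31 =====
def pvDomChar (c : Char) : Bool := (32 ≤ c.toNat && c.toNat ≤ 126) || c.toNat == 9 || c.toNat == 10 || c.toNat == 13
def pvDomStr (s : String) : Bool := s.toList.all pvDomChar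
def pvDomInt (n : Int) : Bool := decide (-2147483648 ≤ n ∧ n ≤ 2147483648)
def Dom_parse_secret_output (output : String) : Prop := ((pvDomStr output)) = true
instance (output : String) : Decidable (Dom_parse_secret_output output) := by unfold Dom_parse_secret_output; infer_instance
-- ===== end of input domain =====

-- B replaces A's manual-index outer loop with a nested consuming inner loop by a flat one-pass
-- state machine (in_key flag + key_lines buffer); same return value.

-- ===== PORT A =====
-- line.split(":", 1)[1]; callers guard with startswith "USERNAME:", so index 1 exists
def pvUserA (line : String) : String :=
  (PySem.List.pyGet? ((PySem.Str.splitMax? line ":" 1).getD []) 1).getD ""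

-- the inner while: collect lines until "PRIVATE_KEY_END" (exclusive); return (key_lines, rest after END)
def pvInnerA : List String → List String × List String
  | [] => ([], [])
  | l :: rest =>
      if l = "PRIVATE_KEY_END" then ([], rest)
      else ((l :: (pvInnerA rest).1), (pvInnerA rest).2)

theorem pvInnerA_rem_le : ∀ ls : List String, (pvInnerA ls).2.length ≤ ls.length := by
  intro ls
  induction ls with
  | nil => simp [pvInnerA]
  | cons l rest ih =>
      simp only [pvInnerA]
      split
      · simp
      · simpa using Nat.le_succ_of_le ih

-- the outer while over the remaining lines
def pvLoopA (lines : List String) (d : PySem.Dict String String) : PySem.Dict String String :=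
  match lines with
  | [] => d
  | line :: rest =>
      if PySem.Str.startswith line "USERNAME:" then
        pvLoopA rest (d.insert "username" (pvUserA line))
      else if line = "PRIVATE_KEY_START" then
        pvLoopA (pvInnerA rest).2
          (d.insert "private_key" (PySem.Str.join "\n" (pvInnerA rest).1))
      else
        pvLoopA rest d
  termination_by lines.length
  decreasing_by
    · simp
    · exact Nat.lt_succ_of_le (pvInnerA_rem_le rest)
    · simp

def parse_secret_output (output : String) : List (String × String) :=
  (pvLoopA ((PySem.Str.split? (PySem.Str.strip output) "\n").getD []) PySem.Dict.empty).items

-- ===== PORT B =====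
def pvUserB (line : String) : String :=
  (PySem.List.pyGet? ((PySem.Str.splitMax? line ":" 1).getD []) 1).getD ""

-- loop state: (secret_data, in_key, key_lines)
def pvStepB (st : PySem.Dict String String × Bool × List String) (line : String) :
    PySem.Dict String String × Bool × List String :=
  match st with
  | (d, true, keyLines) =>
      if line = "PRIVATE_KEY_END" then
        (d.insert "private_key" (PySem.Str.join "\n" keyLines), false, keyLines)
      else (d, true, keyLines ++ [line])
  | (d, false, keyLines) =>
      if PySem.Str.startswith line "USERNAME:" then
        (d.insert "username" (pvUserB line), false, keyLines)
      else if line = "PRIVATE_KEY_START" then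
        (d, true, [])
      else (d, false, keyLines)

def pvFinB (st : PySem.Dict String String × Bool × List String) : PySem.Dict String String :=
  match st with
  | (d, true, keyLines) => d.insert "private_key" (PySem.Str.join "\n" keyLines)
  | (d, false, _) => d

def parse_secret_output_alt (output : String) : List (String × String) :=
  (pvFinB (((PySem.Str.split? (PySem.Str.strip output) "\n").getD []).foldl pvStepB
    (PySem.Dict.empty, false, []))).items

-- ===== PRECONDITION & SPEC =====
def Spec_parse_secret_output (output : String) (out : List (String × String)) : Prop := out = parse_secret_output_alt output
instance (output : String) (out : List (String × String)) : Decidable (Spec_parse_secret_output output out) := by unfold Spec_parse_secret_output; infer_instance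

-- ===== CLAIM (what is proved, stated in full; the proofs are below) =====
def Claim_equal_parse_secret_output : Prop := ∀ (output : String), Dom_parse_secret_output output → Spec_parse_secret_output output (parse_secret_output output)

-- ===== LEMMAS AND PROOFS =====

-- while not in the key block, the leftover buffer is irrelevant to B's final dict
theorem pvAccIrrel : ∀ (ls : List String) (d : PySem.Dict String String) (a1 a2 : List String),
    pvFinB (ls.foldl pvStepB (d, false, a1)) = pvFinB (ls.foldl pvStepB (d, false, a2)) := by
  intro ls
  induction ls with
  | nil => intro d a1 a2; simp [pvFinB]
  | cons l rest ih =>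
      intro d a1 a2
      simp only [List.foldl, pvStepB]
      split_ifs with h1 h2
      · exact ih _ _ _
      · rfl
      · exact ih _ _ _

-- inside the key block, B mirrors A's inner consuming loop
theorem pvKeyLemma : ∀ (ls : List String) (d : PySem.Dict String String) (acc : List String),
    pvFinB (ls.foldl pvStepB (d, true, acc)) =
      pvFinB ((pvInnerA ls).2.foldl pvStepB
        (d.insert "private_key" (PySem.Str.join "\n" (acc ++ (pvInnerA ls).1)), false, [])) := by
  intro ls
  induction ls with
  | nil => intro d acc; simp [pvInnerA, pvFinB]
  | cons l rest ih =>
      intro d acc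
      simp only [List.foldl, pvStepB, pvInnerA]
      split_ifs with h
      · simp only [List.append_nil]
        exact pvAccIrrel _ _ _ _
      · simp only []
        rw [ih d (acc ++ [l])]
        simp

-- main invariant: A's outer loop equals B's fold from a not-in-key state
theorem pvMain : ∀ (n : ℕ) (ls : List String), ls.length ≤ n → ∀ (d : PySem.Dict String String),
    pvLoopA ls d = pvFinB (ls.foldl pvStepB (d, false, [])) := by
  intro n
  induction n with
  | zero =>
      intro ls hls d
      have : ls = [] := List.eq_nil_of_length_eq_zero (Nat.le_zero.mp hls)
      subst this; simp [pvLoopA, pvFinB]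
  | succ n ih =>
      intro ls hls d
      match ls with
      | [] => simp [pvLoopA, pvFinB]
      | line :: rest =>
          have hr : rest.length ≤ n := Nat.le_of_succ_le_succ hls
          simp only [pvLoopA, List.foldl, pvStepB]
          split_ifs with h1 h2
          · rw [ih rest hr]; rfl
          · rw [pvKeyLemma rest d []]
            simp only [List.nil_append]
            exact ih _ (le_trans (pvInnerA_rem_le rest) hr) _
          · rw [ih rest hr]

-- ===== VERDICT (by name: the statement is the Claim_ definition above) =====
theorem parse_secret_output_spec : Claim_equal_parse_secret_output := by
  intro output _
  unfold Spec_parse_secret_output parse_secret_output parse_secret_output_alt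
  rw [pvMain ((PySem.Str.split? (PySem.Str.strip output) "\n").getD []).length _ le_rfl]
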